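-- pv_equiv track=rewrite | github.com/Kawser-nerd/CLCDSA | Source Codes/CodeJamData/14/52/12.py | solve
-- ===== SOURCE A (Python) =====
-- def solve(p, q, monsters, diana):
--     # diana = how many shoots ahead
--     if len(monsters) == 0:
--         return 0
--     hp, gold = monsters[0]
--     shoots = hp // q + (1 if hp % q != 0 else 0)
--     best = solve(p, q, monsters[1:], diana + shoots) # Diana lets it get killed
--     # Diana kills it
--     while hp - q > 0:
--         diana += 1
--         hp -= q
--     shoots = hp // p + (1 if hp % p != 0 else 0)
--     if shoots <= diana:
--         # She can kill it!
--         value = gold + solve(p, q, monsters[1:], diana - shoots)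
--         best = max(best, value)
--     return best
-- ===== SOURCE B (Python) =====
-- def solve(p, q, monsters, diana):
--     # Forward DP over monsters: a dict mapping Diana's spare-shot count -> max gold
--     # collected so far; states with equal spare shots are merged with max.
--     states = {diana: 0}
--     for hp, gold in monsters:
--         skip = hp // q + (1 if hp % q != 0 else 0)
--         r, t = hp, 0
--         while r - q > 0:
--             r -= q
--             t += 1
--         cost = r // p + (1 if r % p != 0 else 0)
--         nd = {}
--         for d, g in states.items():
--             k = d + skip
--             if k not in nd or nd[k] < g:
--                 nd[k] = g
--             if cost <= d + t:
--                 k2 = d + t - cost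
--                 v2 = g + gold
--                 if k2 not in nd or nd[k2] < v2:
--                     nd[k2] = v2
--         states = nd
--     return max(states.values())
-- ===== Notes on version B (the rewrite author's own statement) =====
-- stated objective: faster
-- what changed: Replaces A's exponential two-way recursion over list suffixes by an iterative forward DP that keeps a dict mapping Diana's spare-shot count to the best gold so far, merging states with equal spare shots, and takes the max over the final states.
import Mathlib
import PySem

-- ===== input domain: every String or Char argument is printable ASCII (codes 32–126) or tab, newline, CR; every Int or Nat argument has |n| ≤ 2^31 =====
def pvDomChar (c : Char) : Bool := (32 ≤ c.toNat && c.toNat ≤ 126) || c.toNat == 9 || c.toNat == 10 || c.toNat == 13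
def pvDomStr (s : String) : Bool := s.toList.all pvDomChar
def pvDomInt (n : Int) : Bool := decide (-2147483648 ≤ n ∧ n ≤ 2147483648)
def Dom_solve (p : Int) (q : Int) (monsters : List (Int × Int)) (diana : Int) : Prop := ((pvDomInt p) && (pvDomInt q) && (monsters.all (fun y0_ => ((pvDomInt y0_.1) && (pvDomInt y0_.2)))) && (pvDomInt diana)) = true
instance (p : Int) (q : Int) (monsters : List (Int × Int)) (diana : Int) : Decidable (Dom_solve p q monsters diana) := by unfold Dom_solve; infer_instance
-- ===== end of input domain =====

-- B replaces A's exponential branching recursion over list suffixes by a forward DP over the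
-- monsters that keeps a dict {spare-shots : max gold} and merges states with equal spare shots.

-- Python's `while hp - q > 0: diana += 1; hp -= q`, threaded state (hp, diana); the Nat fuel only
-- makes the loop total in Lean — inside Pre_solve (q > 0, or the loop body never runs) it never runs out.
def pvWinds (q : Int) : Nat → Int × Int → Int × Int
  | 0, s => s
  | n + 1, (hp, d) => if hp - q > 0 then pvWinds q n (hp - q, d + 1) else (hp, d)

-- ===== PORT A =====
def solve (p : Int) (q : Int) (monsters : List (Int × Int)) (diana : Int) : Int :=
  match monsters with
  | [] => 0
  | (hp, gold) :: rest =>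
    let shoots := PySem.Int.floordiv hp q + (if PySem.Int.mod hp q ≠ 0 then 1 else 0)
    let best := solve p q rest (diana + shoots)
    let w := pvWinds q (hp.toNat + 1) (hp, diana)
    let shoots2 := PySem.Int.floordiv w.1 p + (if PySem.Int.mod w.1 p ≠ 0 then 1 else 0)
    if shoots2 ≤ w.2 then max best (gold + solve p q rest (w.2 - shoots2)) else best

-- ===== PORT B =====
-- hp // q + (1 if hp % q != 0 else 0)
def pvCeilShots (a : Int) (b : Int) : Int :=
  PySem.Int.floordiv a b + (if PySem.Int.mod a b ≠ 0 then 1 else 0)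

-- `if k not in nd or nd[k] < v: nd[k] = v`
def pvAddMax (nd : PySem.Dict Int Int) (k : Int) (v : Int) : PySem.Dict Int Int :=
  match nd.get? k with
  | none => nd.insert k v
  | some w => if w < v then nd.insert k v else nd

-- one monster: rebuild the state dict from the old one (skip branch, then kill branch if affordable)
def pvStep (p : Int) (q : Int) (states : PySem.Dict Int Int) (hp : Int) (gold : Int) :
    PySem.Dict Int Int :=
  let skip := pvCeilShots hp q
  let w := pvWinds q (hp.toNat + 1) (hp, 0)
  let cost := pvCeilShots w.1 p
  states.items.foldl
    (fun nd e =>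
      let nd1 := pvAddMax nd (e.1 + skip) e.2
      if cost ≤ e.1 + w.2 then pvAddMax nd1 (e.1 + w.2 - cost) (e.2 + gold) else nd1)
    PySem.Dict.empty

def solve_alt (p : Int) (q : Int) (monsters : List (Int × Int)) (diana : Int) : Int :=
  let final := monsters.foldl (fun s m => pvStep p q s m.1 m.2) (PySem.Dict.ofList [(diana, 0)])
  match final.values with
  | [] => 0  -- unreachable (the state dict is never empty); totality guard for Python's max(...)
  | x :: xs => xs.foldl max x

-- ===== PRECONDITION & SPEC =====
-- Exactly the inputs where Python A terminates without an exception: with a nonempty monster list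
-- A divides by q and p (q ≠ 0, p ≠ 0) and its while loop terminates (q > 0, or no monster has hp > q).
def Pre_solve (p : Int) (q : Int) (monsters : List (Int × Int)) (diana : Int) : Prop :=
  monsters = [] ∨ (p ≠ 0 ∧ q ≠ 0 ∧ (0 < q ∨ ∀ m ∈ monsters, m.1 ≤ q))
instance (p : Int) (q : Int) (monsters : List (Int × Int)) (diana : Int) : Decidable (Pre_solve p q monsters diana) := by unfold Pre_solve; infer_instance

def pvWitness_solve : Int × Int × (List (Int × Int)) × Int := (3, 2, [(5, 10), (1, 2)], 1)

def Spec_solve (p : Int) (q : Int) (monsters : List (Int × Int)) (diana : Int) (out : Int) : Prop := out = solve_alt p q monsters diana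
instance (p : Int) (q : Int) (monsters : List (Int × Int)) (diana : Int) (out : Int) : Decidable (Spec_solve p q monsters diana out) := by unfold Spec_solve; infer_instance

-- ===== CLAIM (what is proved, stated in full; the proofs are below) =====
def Claim_equal_solve : Prop := ∀ (p : Int) (q : Int) (monsters : List (Int × Int)) (diana : Int), Dom_solve p q monsters diana → Pre_solve p q monsters diana → Spec_solve p q monsters diana (solve p q monsters diana)

-- ===== LEMMAS AND PROOFS =====

-- max(x :: xs) as the running-max fold B performs
theorem pvMaximumCons (x : Int) (xs : List Int) : (x :: xs).maximum = ↑(xs.foldl max x) := by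
  induction xs generalizing x with
  | nil => simp [List.maximum_cons]
  | cons y ys ih =>
    rw [List.maximum_cons, ih y, List.foldl_cons, List.foldl_assoc, ← WithBot.coe_max]

-- the while loop is additive in the diana component
theorem pvWinds_shift (q : Int) (n : Nat) : ∀ (hp d : Int),
    pvWinds q n (hp, d) = ((pvWinds q n (hp, 0)).1, d + (pvWinds q n (hp, 0)).2) := by
  induction n with
  | zero => intro hp d; simp [pvWinds]
  | succ n ih =>
    intro hp d
    simp only [pvWinds]
    split
    · rw [ih (hp - q) (d + 1), ih (hp - q) (0 + 1)]; simp [add_assoc]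
    · simp

-- value of A on a cons, phrased with B's helper names
theorem solve_cons (p q hp gold diana : Int) (rest : List (Int × Int)) :
    solve p q ((hp, gold) :: rest) diana =
      (if pvCeilShots (pvWinds q (hp.toNat + 1) (hp, 0)).1 p ≤ diana + (pvWinds q (hp.toNat + 1) (hp, 0)).2 then
        max (solve p q rest (diana + pvCeilShots hp q))
          (gold + solve p q rest (diana + (pvWinds q (hp.toNat + 1) (hp, 0)).2 -
            pvCeilShots (pvWinds q (hp.toNat + 1) (hp, 0)).1 p))
      else solve p q rest (diana + pvCeilShots hp q)) := by
  rw [solve]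
  simp only [pvWinds_shift q (hp.toNat + 1) hp diana, pvCeilShots]

-- maximum of (v + c k) over a dict after pvAddMax
theorem pvM_addMax (c : Int → Int) (nd : PySem.Dict Int Int) (hnd : nd.keys.Nodup)
    (k v : Int) :
    ((pvAddMax nd k v).items.map (fun e => e.2 + c e.1)).maximum =
      max ((nd.items.map (fun e => e.2 + c e.1)).maximum) ↑(v + c k) := by
  cases hg : nd.get? k with
  | none =>
    have hpv : pvAddMax nd k v = nd.insert k v := by simp only [pvAddMax, hg]
    have hc : nd.contains k = false := by
      rw [PySem.Dict.contains_eq_isSome_get?, hg]; rfl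
    rw [hpv, PySem.Dict.items_insert, hc, if_neg (by simp), List.map_append, List.maximum_append]
    simp [List.maximum_cons]
  | some w =>
    have hmem : (k, w) ∈ nd.items := PySem.Dict.mem_items_of_get?_eq_some nd hg
    have hc : nd.contains k = true := by
      rw [PySem.Dict.contains_eq_isSome_get?, hg]; rfl
    obtain ⟨l1, l2, hsplit⟩ := List.append_of_mem hmem
    have hkeys : nd.keys = l1.map Prod.fst ++ k :: l2.map Prod.fst := by
      simp [PySem.Dict.keys, hsplit]
    have hknd : (l1.map Prod.fst ++ k :: l2.map Prod.fst).Nodup := by rwa [hkeys] at hnd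
    have hk1 : ∀ e ∈ l1, e.1 ≠ k := fun e he hek =>
      (List.disjoint_of_nodup_append hknd) (List.mem_map.mpr ⟨e, he, hek⟩) List.mem_cons_self
    have hk2 : ∀ e ∈ l2, e.1 ≠ k := fun e he hek =>
      (List.nodup_cons.mp (List.nodup_append.mp hknd).2.1).1 (List.mem_map.mpr ⟨e, he, hek⟩)
    have hpv : pvAddMax nd k v = if w < v then nd.insert k v else nd := by
      simp only [pvAddMax, hg]
    by_cases hw : w < v
    · -- w < v : the entry at k is overwritten with v
      rw [hpv, if_pos hw, PySem.Dict.items_insert, hc, if_pos rfl, hsplit]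
      rw [List.map_append, List.map_cons]
      have e1 : l1.map (fun e => if e.1 == k then (k, v) else e) = l1.map id :=
        List.map_congr_left (fun e he => by simp [hk1 e he])
      have e2 : l2.map (fun e => if e.1 == k then (k, v) else e) = l2.map id :=
        List.map_congr_left (fun e he => by simp [hk2 e he])
      rw [e1, e2, List.map_id, List.map_id]
      simp only [List.map_append, List.map_cons, List.maximum_append, List.maximum_cons,
        beq_self_eq_true, if_true]
      set M1 := (l1.map fun e => e.2 + c e.1).maximum with hM1
      set M2 := (l2.map fun e => e.2 + c e.1).maximum with hM2
      have hle : (↑(w + c k) : WithBot Int) ≤ ↑(v + c k) :=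
        WithBot.coe_le_coe.mpr (by linarith)
      have key : max (max (↑(w + c k) : WithBot Int) M2) ↑(v + c k) = max (↑(v + c k) : WithBot Int) M2 := by
        rw [max_comm (↑(w + c k) : WithBot Int) M2, max_assoc, max_eq_right hle, max_comm M2 _]
      rw [max_assoc, key]
    · -- v ≤ w : nothing changes, and v + c k is dominated by w + c k
      rw [hpv, if_neg hw]
      have hmem' : w + c k ∈ nd.items.map (fun e => e.2 + c e.1) :=
        List.mem_map.mpr ⟨(k, w), hmem, rfl⟩
      have hle : (↑(v + c k) : WithBot Int) ≤ (nd.items.map (fun e => e.2 + c e.1)).maximum :=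
        le_trans (WithBot.coe_le_coe.mpr (by have := not_lt.mp hw; linarith))
          (List.le_maximum_of_mem' hmem')
      exact (max_eq_left hle).symm

theorem pvAddMax_nodup (nd : PySem.Dict Int Int) (hnd : nd.keys.Nodup) (k v : Int) :
    (pvAddMax nd k v).keys.Nodup := by
  cases hg : nd.get? k with
  | none =>
    have hpv : pvAddMax nd k v = nd.insert k v := by simp only [pvAddMax, hg]
    rw [hpv]; exact PySem.Dict.nodup_keys_insert _ _ _ hnd
  | some w =>
    have hpv : pvAddMax nd k v = if w < v then nd.insert k v else nd := by
      simp only [pvAddMax, hg]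
    by_cases hw : w < v
    · rw [hpv, if_pos hw]; exact PySem.Dict.nodup_keys_insert _ _ _ hnd
    · rw [hpv, if_neg hw]; exact hnd

-- the inner fold over the old states: maximum over the new dict = old dict's ⊔ contributions
theorem pvM_fold (c : Int → Int) (skip t cost gold : Int) (l : List (Int × Int)) :
    ∀ (nd : PySem.Dict Int Int), nd.keys.Nodup →
    ((l.foldl
        (fun nd e =>
          let nd1 := pvAddMax nd (e.1 + skip) e.2
          if cost ≤ e.1 + t then pvAddMax nd1 (e.1 + t - cost) (e.2 + gold) else nd1)
        nd).items.map (fun e => e.2 + c e.1)).maximum =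
      max ((nd.items.map (fun e => e.2 + c e.1)).maximum)
        ((l.map (fun e =>
          if cost ≤ e.1 + t then max (e.2 + c (e.1 + skip)) (e.2 + gold + c (e.1 + t - cost))
          else e.2 + c (e.1 + skip))).maximum) := by
  induction l with
  | nil => intro nd hnd; simp
  | cons x xs ih =>
    intro nd hnd
    rw [List.foldl_cons]
    have hstep :
        (((fun nd (e : Int × Int) =>
          let nd1 := pvAddMax nd (e.1 + skip) e.2
          if cost ≤ e.1 + t then pvAddMax nd1 (e.1 + t - cost) (e.2 + gold) else nd1) nd x).items.map
            (fun e => e.2 + c e.1)).maximum =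
          max ((nd.items.map (fun e => e.2 + c e.1)).maximum)
            ↑(if cost ≤ x.1 + t then max (x.2 + c (x.1 + skip)) (x.2 + gold + c (x.1 + t - cost))
              else x.2 + c (x.1 + skip)) := by
      simp only
      by_cases hcx : cost ≤ x.1 + t
      · simp only [if_pos hcx]
        rw [pvM_addMax c _ (pvAddMax_nodup nd hnd _ _), pvM_addMax c nd hnd, max_assoc,
          WithBot.coe_max]
      · simp only [if_neg hcx]
        rw [pvM_addMax c nd hnd]
    have hnd' : ((fun nd (e : Int × Int) =>
          let nd1 := pvAddMax nd (e.1 + skip) e.2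
          if cost ≤ e.1 + t then pvAddMax nd1 (e.1 + t - cost) (e.2 + gold) else nd1) nd x).keys.Nodup := by
      simp only
      split
      · exact pvAddMax_nodup _ (pvAddMax_nodup nd hnd _ _) _ _
      · exact pvAddMax_nodup nd hnd _ _
    rw [ih _ hnd', hstep, List.map_cons, List.maximum_cons, ← max_assoc]

-- one pvStep preserves the invariant: maximum of (gold-so-far + A's value on the remaining list)
theorem pvStep_invariant (p q hp gold : Int) (rest : List (Int × Int))
    (S : PySem.Dict Int Int) (hnd : S.keys.Nodup) :
    ((pvStep p q S hp gold).items.map (fun e => e.2 + solve p q rest e.1)).maximum =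
      (S.items.map (fun e => e.2 + solve p q ((hp, gold) :: rest) e.1)).maximum := by
  unfold pvStep
  simp only
  rw [pvM_fold (fun d => solve p q rest d) _ _ _ _ S.items PySem.Dict.empty (by simp)]
  have : PySem.Dict.empty.items = ([] : List (Int × Int)) := rfl
  rw [this]
  simp only [List.map_nil, List.maximum_nil, max_bot_left]
  congr 1
  apply List.map_congr_left
  intro e _
  rw [solve_cons]
  split
  · rw [add_assoc, max_add_add_left]
  · rfl

theorem pvFold_nodup (skip t cost gold : Int) (l : List (Int × Int)) :
    ∀ (nd : PySem.Dict Int Int), nd.keys.Nodup →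
    ((l.foldl
        (fun nd e =>
          let nd1 := pvAddMax nd (e.1 + skip) e.2
          if cost ≤ e.1 + t then pvAddMax nd1 (e.1 + t - cost) (e.2 + gold) else nd1)
        nd)).keys.Nodup := by
  induction l with
  | nil => intro nd hnd; exact hnd
  | cons x xs ih =>
    intro nd hnd
    rw [List.foldl_cons]
    apply ih
    simp only
    split
    · exact pvAddMax_nodup _ (pvAddMax_nodup nd hnd _ _) _ _
    · exact pvAddMax_nodup nd hnd _ _

theorem pvStep_nodup (p q hp gold : Int) (S : PySem.Dict Int Int) :
    (pvStep p q S hp gold).keys.Nodup := by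
  unfold pvStep
  exact pvFold_nodup _ _ _ _ S.items PySem.Dict.empty (PySem.Dict.nodup_keys_empty)

-- the whole fold over the monsters
theorem pv_main (p q : Int) (monsters : List (Int × Int)) :
    ∀ (S : PySem.Dict Int Int), S.keys.Nodup →
    (((monsters.foldl (fun s m => pvStep p q s m.1 m.2) S)).items.map
        (fun e => e.2 + solve p q [] e.1)).maximum =
      (S.items.map (fun e => e.2 + solve p q monsters e.1)).maximum := by
  induction monsters with
  | nil => intro S _; rfl
  | cons m ms ih =>
    intro S hnd
    rw [List.foldl_cons, ih _ (pvStep_nodup p q m.1 m.2 S), pvStep_invariant p q m.1 m.2 ms S hnd]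

theorem pv_equiv (p q : Int) (monsters : List (Int × Int)) (diana : Int) :
    solve p q monsters diana = solve_alt p q monsters diana := by
  unfold solve_alt
  simp only
  have h0 : (PySem.Dict.ofList [(diana, (0 : Int))]).keys.Nodup :=
    PySem.Dict.nodup_keys_ofList _
  have h := pv_main p q monsters (PySem.Dict.ofList [(diana, 0)]) h0
  have hitems : (PySem.Dict.ofList [(diana, (0 : Int))]).items = [(diana, 0)] := rfl
  rw [hitems] at h
  simp only [List.map_cons, List.map_nil] at h
  -- RHS of h is ↑(0 + solve p q monsters diana)
  set final := monsters.foldl (fun s m => pvStep p q s m.1 m.2) (PySem.Dict.ofList [(diana, 0)]) with hfinal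
  have hv : final.values = final.items.map Prod.snd := rfl
  cases hvv : final.values with
  | nil =>
    exfalso
    have : final.items = [] := by
      cases hii : final.items with
      | nil => rfl
      | cons a l => rw [hv, hii] at hvv; simp at hvv
    rw [this] at h
    simp [List.maximum_nil, List.maximum_cons] at h
  | cons x xs =>
    have hmapeq : final.items.map (fun e => e.2 + solve p q [] e.1) = final.values := by
      rw [hv]
      apply List.map_congr_left
      intro e _
      show e.2 + solve p q [] e.1 = e.2
      simp [solve]
    rw [hmapeq, hvv, pvMaximumCons] at h
    rw [List.maximum_cons, List.maximum_nil] at h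
    have hco : (↑(xs.foldl max x) : WithBot Int) = ↑(0 + solve p q monsters diana) := by
      rw [h]; simp
    have hfin := WithBot.coe_injective hco
    rw [zero_add] at hfin
    show solve p q monsters diana = xs.foldl max x
    exact hfin.symm

-- ===== VERDICT (by name: the statement is the Claim_ definition above) =====
theorem solve_spec : Claim_equal_solve := by
  intro p q monsters diana _ _
  unfold Spec_solve
  exact pv_equiv p q monsters diana
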